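-- pv_equiv track=rewrite | github.com/manwar/perlweeklychallenge-club | challenge-302/roger-bell-west/python/ch-2.py | stepbystep
-- ===== SOURCE A (Python) =====
-- def stepbystep(a):
--   mv = 0
--   tot = 0
--   for s in a:
--     tot += s
--     if mv > tot:
--       mv = tot
--   return 1 - mv
-- ===== SOURCE B (Python) =====
-- def stepbystep(a):
--   # Backward DP over suffixes: worst = min(0, lowest total reachable from here on).
--   worst = 0
--   for s in reversed(a):
--     worst = min(0, s + worst)
--   return 1 - worst
-- ===== Notes on version B (the rewrite author's own statement) =====
-- stated objective: alternative
-- what changed: Replaces A's forward scan that accumulates prefix sums while tracking their running minimum with a backward dynamic program over suffixes: traversing the list right-to-left it maintains worst = min(0, lowest partial sum reachable from that position), so no prefix sum is ever computed; correct because the capped minimum prefix sum satisfies the recurrence M(s::rest) = min(0, s + M(rest)).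
import Mathlib
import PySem

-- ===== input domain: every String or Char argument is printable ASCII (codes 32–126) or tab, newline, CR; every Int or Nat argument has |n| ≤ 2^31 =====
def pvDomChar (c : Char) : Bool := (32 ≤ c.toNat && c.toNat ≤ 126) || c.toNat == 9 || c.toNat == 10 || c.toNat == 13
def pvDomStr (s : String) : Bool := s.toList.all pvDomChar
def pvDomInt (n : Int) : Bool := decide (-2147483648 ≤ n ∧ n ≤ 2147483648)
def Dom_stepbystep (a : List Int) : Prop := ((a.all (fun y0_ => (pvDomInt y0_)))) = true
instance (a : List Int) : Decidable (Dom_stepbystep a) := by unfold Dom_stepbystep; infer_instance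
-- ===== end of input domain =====

-- B replaces A's forward prefix-sum scan with a backward suffix DP (objective: alternative, same cost).

-- ===== PORT A =====
-- A's single forward loop: carry (mv, tot), add s to tot, lower mv when tot drops below it.
def stepbystep (a : List Int) : Int :=
  let st := a.foldl (fun (p : Int × Int) s =>
    let tot := p.2 + s
    (if p.1 > tot then tot else p.1, tot)) (0, 0)
  1 - st.1

-- ===== PORT B =====
-- B's backward loop over reversed a: worst = min(0, s + worst).
def stepbystep_alt (a : List Int) : Int :=
  let worst := a.reverse.foldl (fun (worst : Int) s => min 0 (s + worst)) 0
  1 - worst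

-- ===== PRECONDITION & SPEC =====
def Spec_stepbystep (a : List Int) (out : Int) : Prop := out = stepbystep_alt a
instance (a : List Int) (out : Int) : Decidable (Spec_stepbystep a out) := by unfold Spec_stepbystep; infer_instance

-- ===== CLAIM (what is proved, stated in full; the proofs are below) =====
def Claim_equal_stepbystep : Prop := ∀ (a : List Int), Dom_stepbystep a → Spec_stepbystep a (stepbystep a)

-- ===== LEMMAS AND PROOFS =====
-- B's backward foldl over the reverse is the right fold with step min 0 (s + ·).
theorem alt_foldr (a : List Int) :
    a.reverse.foldl (fun (worst : Int) s => min 0 (s + worst)) 0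
    = a.foldr (fun s worst => min 0 (s + worst)) 0 := by
  rw [List.foldl_reverse]

theorem foldr_nonpos (a : List Int) :
    a.foldr (fun s worst => min 0 (s + worst)) 0 ≤ 0 := by
  cases a with
  | nil => simp
  | cons s rest => simp [List.foldr, min_def]; split_ifs <;> omega

-- A's loop from state (mv, tot) with mv ≤ tot yields min mv (tot + suffix DP value).
theorem loop_eq (a : List Int) : ∀ (mv tot : Int), mv ≤ tot →
    (a.foldl (fun (p : Int × Int) s =>
      let tot := p.2 + s
      (if p.1 > tot then tot else p.1, tot)) (mv, tot)).1
    = min mv (tot + a.foldr (fun s worst => min 0 (s + worst)) 0) := by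
  induction a with
  | nil => intro mv tot h; simp [min_def]; omega
  | cons s rest ih =>
    intro mv tot h
    simp only [List.foldl, List.foldr]
    rw [ih (if mv > tot + s then tot + s else mv) (tot + s) (by split_ifs <;> omega)]
    have hr := foldr_nonpos rest
    simp only [min_def] at hr ⊢
    split_ifs <;> omega

-- ===== VERDICT (by name: the statement is the Claim_ definition above) =====
theorem stepbystep_spec : Claim_equal_stepbystep := by
  intro a _
  unfold Spec_stepbystep stepbystep stepbystep_alt
  simp only [alt_foldr, loop_eq a 0 0 le_rfl]
  have := foldr_nonpos a
  simp only [min_def] at this ⊢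
  split_ifs <;> omega
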